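-- pv_equiv track=rewrite | github.com/magnus26491/axis-scaffolding | build_site.py | breadcrumb_nav
-- ===== SOURCE A (Python) =====
-- def breadcrumb_nav(items: list[tuple[str, str]]) -> str:
--     parts = []
--     for idx, (name, path) in enumerate(items):
--         if idx < len(items) - 1:
--             parts.append(f'<a href="{path}">{name}</a>')
--         else:
--             parts.append(f"<span>{name}</span>")
--     return '<nav class="breadcrumbs" aria-label="Breadcrumb">' + ' <span aria-hidden="true">&gt;</span> '.join(parts) + "</nav>"
-- ===== SOURCE B (Python) =====
-- def breadcrumb_nav(items: list[tuple[str, str]]) -> str: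
--     crumbs = ''
--     if items:
--         crumbs = f"<span>{items[-1][0]}</span>"
--         for name, path in reversed(items[:-1]):
--             crumbs = f'<a href="{path}">{name}</a>' + ' <span aria-hidden="true">&gt;</span> ' + crumbs
--     return '<nav class="breadcrumbs" aria-label="Breadcrumb">' + crumbs + "</nav>"
-- ===== Notes on version B (the rewrite author's own statement) =====
-- stated objective: alternative
-- what changed: B replaces the enumerate loop building a parts list plus a join with a right-to-left traversal that accumulates the final crumbs string directly: it starts from the <span> for the last item and prepends each earlier anchor together with the separator, so there is no parts list, no join and no per-iteration index test.
import Mathlib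
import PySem

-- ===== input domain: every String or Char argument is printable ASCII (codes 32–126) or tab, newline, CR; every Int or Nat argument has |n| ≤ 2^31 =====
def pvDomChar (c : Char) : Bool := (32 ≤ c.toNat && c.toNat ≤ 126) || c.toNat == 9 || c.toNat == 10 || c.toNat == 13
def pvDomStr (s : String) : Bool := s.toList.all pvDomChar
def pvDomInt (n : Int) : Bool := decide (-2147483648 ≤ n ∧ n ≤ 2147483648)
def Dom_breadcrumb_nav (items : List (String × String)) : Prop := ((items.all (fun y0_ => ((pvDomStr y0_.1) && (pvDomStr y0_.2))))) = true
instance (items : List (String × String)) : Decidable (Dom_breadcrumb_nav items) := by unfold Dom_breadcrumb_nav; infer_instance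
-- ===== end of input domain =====

-- B builds the crumbs string right-to-left by direct accumulation (span of the last item, then prepend
-- each earlier anchor with the separator), with no parts list, no join and no index test (alternative decomposition).

-- ===== PORT A =====
-- the f-string '<a href="{path}">{name}</a>'
def pvAnchor (nv : String × String) : String := "<a href=\"" ++ nv.2 ++ "\">" ++ nv.1 ++ "</a>"
-- the f-string '<span>{name}</span>'
def pvSpan (name : String) : String := "<span>" ++ name ++ "</span>"
def pvSep : String := " <span aria-hidden=\"true\">&gt;</span> "

def breadcrumb_nav (items : List (String × String)) : String :=
  let parts : List String :=
    (PySem.List.enumerate items 0).foldl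
      (fun parts p =>
        if p.1 < (items.length : Int) - 1 then
          parts ++ [pvAnchor p.2]
        else
          parts ++ [pvSpan p.2.1]) []
  "<nav class=\"breadcrumbs\" aria-label=\"Breadcrumb\">"
    ++ PySem.Str.join pvSep parts ++ "</nav>"

-- ===== PORT B =====
def breadcrumb_nav_alt (items : List (String × String)) : String :=
  let crumbs : String :=
    match PySem.List.pyGet? items (-1) with      -- 'if items:' together with 'items[-1][0]'
    | none => ""
    | some last =>
      -- 'for name, path in reversed(items[:-1]): crumbs = anchor + SEP + crumbs'
      (PySem.List.slice items none (some (-1))).reverse.foldl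
        (fun acc nv => pvAnchor nv ++ pvSep ++ acc) (pvSpan last.1)
  "<nav class=\"breadcrumbs\" aria-label=\"Breadcrumb\">" ++ crumbs ++ "</nav>"

-- ===== PRECONDITION & SPEC =====
def Spec_breadcrumb_nav (items : List (String × String)) (out : String) : Prop := out = breadcrumb_nav_alt items
instance (items : List (String × String)) (out : String) : Decidable (Spec_breadcrumb_nav items out) := by unfold Spec_breadcrumb_nav; infer_instance

-- ===== CLAIM =====
def Claim_equal_breadcrumb_nav : Prop := ∀ (items : List (String × String)), Dom_breadcrumb_nav items → Spec_breadcrumb_nav items (breadcrumb_nav items)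

-- ===== LEMMAS AND PROOFS =====

-- String-level versions of the PySem.Chars join lemmas.
theorem pv_join_nil (sep : String) : PySem.Str.join sep [] = "" := by
  apply String.toList_inj.mp
  simp [PySem.Str.toList_join, PySem.Chars.join_nil]

theorem pv_join_singleton (sep p : String) : PySem.Str.join sep [p] = p := by
  apply String.toList_inj.mp
  simp [PySem.Str.toList_join, PySem.Chars.join_singleton]

theorem pv_join_cons_cons (sep p q : String) (rest : List String) :
    PySem.Str.join sep (p :: q :: rest) = p ++ sep ++ PySem.Str.join sep (q :: rest) := by
  apply String.toList_inj.mp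
  simp [PySem.Str.toList_join, PySem.Chars.join_cons_cons]

-- A's enumerate loop produces exactly anchors for all but the last item and a span for the last.
theorem pv_parts_eq (items : List (String × String)) :
    (PySem.List.enumerate items 0).map
      (fun p => if p.1 < (items.length : Int) - 1 then pvAnchor p.2 else pvSpan p.2.1)
    = items.dropLast.map pvAnchor
        ++ (match items.getLast? with
            | none => []
            | some last => [pvSpan last.1]) := by
  induction items using List.reverseRecOn with
  | nil => simp [PySem.List.enumerate]
  | append_singleton ys z _ =>
    rw [PySem.List.enumerate_append, List.map_append, List.dropLast_concat,
        List.getLast?_concat]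
    have h1 : List.map
          (fun p => if p.1 < (((ys ++ [z]).length : Nat) : Int) - 1 then pvAnchor p.2 else pvSpan p.2.1)
          (PySem.List.enumerate ys)
        = List.map (fun p => pvAnchor p.2) (PySem.List.enumerate ys) := by
      apply List.map_congr_left
      intro p hp
      rcases (PySem.List.mem_enumerate_iff _ _ _).1 hp with ⟨k, hk, rfl⟩
      have hc : (0 + (k : Int)) < (((ys ++ [z]).length : Nat) : Int) - 1 := by
        simp [List.length_append]; omega
      exact if_pos hc
    rw [h1]
    have h2 : List.map (fun p => pvAnchor p.2) (PySem.List.enumerate ys)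
        = List.map pvAnchor ys := by
      have hsnd := PySem.List.map_snd_enumerate (xs := ys) (s := 0)
      calc List.map (fun p => pvAnchor p.2) (PySem.List.enumerate ys)
          = List.map pvAnchor (List.map (·.2) (PySem.List.enumerate ys)) := by
            rw [List.map_map]; rfl
        _ = List.map pvAnchor ys := by rw [hsnd]
    rw [h2]
    simp [PySem.List.enumerate, List.length_append]

-- Joining the anchors followed by the final span equals B's right-to-left accumulation.
theorem pv_join_eq_foldr (l : String × String) (ys : List (String × String)) :
    PySem.Str.join pvSep (ys.map pvAnchor ++ [pvSpan l.1])
      = ys.foldr (fun nv acc => pvAnchor nv ++ pvSep ++ acc) (pvSpan l.1) := by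
  induction ys with
  | nil => simp [pv_join_singleton]
  | cons x ys ih =>
    rcases hne : ys.map pvAnchor ++ [pvSpan l.1] with _ | ⟨q, rest⟩
    · exact absurd hne (by simp)
    · simp only [List.map_cons, List.cons_append, hne, pv_join_cons_cons, List.foldr_cons]
      rw [← hne, ih]

theorem breadcrumb_nav_eq (items : List (String × String)) :
    breadcrumb_nav items = breadcrumb_nav_alt items := by
  unfold breadcrumb_nav breadcrumb_nav_alt
  have hstep : (fun (parts : List String) (p : Int × (String × String)) =>
        if p.1 < (items.length : Int) - 1 then parts ++ [pvAnchor p.2]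
        else parts ++ [pvSpan p.2.1])
      = fun parts p =>
        parts ++ [if p.1 < (items.length : Int) - 1 then pvAnchor p.2 else pvSpan p.2.1] := by
    funext parts p; split <;> rfl
  rw [hstep, PySem.List.foldl_append_singleton_eq_map, List.nil_append, pv_parts_eq,
      PySem.List.slice_to_neg_one, PySem.List.pyGet?_neg_one]
  cases h : items.getLast? with
  | none =>
    rw [List.getLast?_eq_none_iff.mp h]
    simp [pv_join_nil]
  | some last =>
    simp only [List.foldl_reverse]
    rw [pv_join_eq_foldr last items.dropLast]

-- ===== VERDICT =====
theorem breadcrumb_nav_spec : Claim_equal_breadcrumb_nav := by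
  intro items _
  exact breadcrumb_nav_eq items
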